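-- pv_equiv track=rewrite | github.com/JoksterCube/bachalor | Bakalauras TEX - In Progress/scripts/AddAltitudeAndRoundedColumns.py | create_formated_location_steps
-- ===== SOURCE A (Python) =====
-- def create_formated_location_steps(lats, lngs, r_step):
--     prev_r = 0
--     l = len(lats)
--     locations = []
--     for r in range(r_step, l + r_step, r_step):
--         locs = []
--         for i in range(prev_r, r):
--             if i >= l:
--                 break
--             locs.append(str(lats[i]) + ',' +  str(lngs[i]))
--         prev_r = r
--         locations.append("|".join(locs))
--     return locations
-- ===== SOURCE B (Python) =====
-- def create_formated_location_steps(lats, lngs, r_step):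
--     formatted = [str(lats[i]) + ',' + str(lngs[i]) for i in range(len(lats))]
--     return ['|'.join(formatted[i:i + r_step]) for i in range(0, len(lats), r_step)]
-- ===== Notes on version B (the rewrite author's own statement) =====
-- stated objective: simpler
-- what changed: Replaces A's interleaved nested loop with manual prev_r tracking by two independent passes: one flat formatting pass over the indices, then a slicing pass that joins each r_step-sized chunk of the flat list.
-- outside the precondition, e.g. on create_formated_location_steps(['1'], [], -1): A returns [], B raises IndexError
import Mathlib
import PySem

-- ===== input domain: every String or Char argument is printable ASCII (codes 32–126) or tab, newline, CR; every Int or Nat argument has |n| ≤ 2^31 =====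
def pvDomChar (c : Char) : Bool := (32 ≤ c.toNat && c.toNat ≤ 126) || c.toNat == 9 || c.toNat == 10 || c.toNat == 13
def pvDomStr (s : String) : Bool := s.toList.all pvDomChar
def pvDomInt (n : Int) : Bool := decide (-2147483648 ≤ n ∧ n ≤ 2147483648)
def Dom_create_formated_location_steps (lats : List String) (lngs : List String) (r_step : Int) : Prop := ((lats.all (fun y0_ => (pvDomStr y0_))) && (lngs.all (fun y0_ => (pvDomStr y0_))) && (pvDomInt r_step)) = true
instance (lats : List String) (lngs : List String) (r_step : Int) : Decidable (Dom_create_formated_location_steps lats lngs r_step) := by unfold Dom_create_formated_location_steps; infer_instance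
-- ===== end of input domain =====

-- B separates formatting from chunking (one flat formatting pass, then a slicing pass) instead of A's
-- interleaved nested loop with manual prev_r tracking; objective: simpler.


-- ===== PORT A =====
-- inner loop 'for i in range(prev_r, r): if i >= l: break; locs.append(str(lats[i]) + "," + str(lngs[i]))'
-- (the step-1 range is walked by recursion on the index i, stopping at r or at the break)
def pvInnerA (lats : List String) (lngs : List String) (l : Int) (i r : Int) : List String :=
  if i < r then
    if i ≥ l then []
    else (PySem.List.pyGetD lats i "" ++ "," ++ PySem.List.pyGetD lngs i "") :: pvInnerA lats lngs l (i + 1) r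
  else []
termination_by (r - i).toNat
decreasing_by omega

-- outer loop 'for r in range(r_step, l + r_step, r_step)' carrying prev_r
def pvOuterA (lats : List String) (lngs : List String) (l : Int) : Int → List Int → List String
  | _, [] => []
  | prev_r, r :: rest =>
    PySem.Str.join "|" (pvInnerA lats lngs l prev_r r) ::
      pvOuterA lats lngs l r rest

def create_formated_location_steps (lats : List String) (lngs : List String) (r_step : Int) : List String :=
  pvOuterA lats lngs (lats.length : Int) 0
    (PySem.List.pyRange r_step ((lats.length : Int) + r_step) r_step)

-- ===== PORT B =====
def create_formated_location_steps_alt (lats : List String) (lngs : List String) (r_step : Int) : List String :=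
  let l : Int := (lats.length : Int)
  let formatted := (PySem.List.pyRange 0 l 1).map
    (fun i => PySem.List.pyGetD lats i "" ++ "," ++ PySem.List.pyGetD lngs i "")
  (PySem.List.pyRange 0 l r_step).map
    (fun i => PySem.Str.join "|" (PySem.List.slice formatted (some i) (some (i + r_step))))

-- ===== PRECONDITION & SPEC =====
-- Pre_ excludes r_step = 0 (range raises ValueError in both A and B) and lngs shorter than lats
-- (IndexError; for negative r_step A happens to return [] before ever indexing, while B formats
-- the flat list eagerly and naturally raises there, so those inputs are excluded).
def Pre_create_formated_location_steps (lats : List String) (lngs : List String) (r_step : Int) : Prop :=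
  r_step ≠ 0 ∧ lats.length ≤ lngs.length
instance (lats : List String) (lngs : List String) (r_step : Int) : Decidable (Pre_create_formated_location_steps lats lngs r_step) := by unfold Pre_create_formated_location_steps; infer_instance

def pvWitness_create_formated_location_steps : List String × List String × Int :=
  (["10", "20", "30"], ["1", "2", "3"], 2)

def Spec_create_formated_location_steps (lats : List String) (lngs : List String) (r_step : Int) (out : List String) : Prop := out = create_formated_location_steps_alt lats lngs r_step
instance (lats : List String) (lngs : List String) (r_step : Int) (out : List String) : Decidable (Spec_create_formated_location_steps lats lngs r_step out) := by unfold Spec_create_formated_location_steps; infer_instance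

-- ===== CLAIM (what is proved, stated in full; the proofs are below) =====
def Claim_equal_create_formated_location_steps : Prop := ∀ (lats : List String) (lngs : List String) (r_step : Int), Dom_create_formated_location_steps lats lngs r_step → Pre_create_formated_location_steps lats lngs r_step → Spec_create_formated_location_steps lats lngs r_step (create_formated_location_steps lats lngs r_step)

-- ===== LEMMAS AND PROOFS =====

lemma pvRange_nonpos_nil {a b s : Int} (hs : s < 0) (h : a ≤ b) :
    PySem.List.pyRange a b s = [] := by
  simp [PySem.List.pyRange, hs.ne, not_lt.mpr h, not_lt.mpr hs.le]

lemma pvRange_pos_nil {a b s : Int} (hs : 0 < s) (h : b ≤ a) :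
    PySem.List.pyRange a b s = [] := by
  rw [PySem.List.pyRange_of_pos _ _ hs, if_neg (not_lt.mpr h)]
  simp

lemma pvRange_pos_cons {a b s : Int} (hs : 0 < s) (h : a < b) :
    PySem.List.pyRange a b s = a :: PySem.List.pyRange (a + s) b s := by
  rw [PySem.List.pyRange_of_pos _ _ hs, PySem.List.pyRange_of_pos _ _ hs, if_pos h]
  have hcnt : ((b - a + s - 1) / s).toNat
      = (if a + s < b then ((b - (a + s) + s - 1) / s).toNat else 0) + 1 := by
    have h1 : b - a + s - 1 = (b - a - 1) + 1 * s := by ring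
    have h2 : (b - a + s - 1) / s = (b - a - 1) / s + 1 := by
      rw [h1, Int.add_mul_ediv_right _ _ hs.ne']
    by_cases hb : a + s < b
    · rw [if_pos hb, h2]
      have h3 : b - (a + s) + s - 1 = b - a - 1 := by ring
      rw [h3]
      have hnn : 0 ≤ (b - a - 1) / s := Int.ediv_nonneg (by omega) hs.le
      omega
    · rw [if_neg hb, h2]
      have h4 : (b - a - 1) / s = 0 := Int.ediv_eq_zero_of_lt (by omega) (by omega)
      omega
  rw [hcnt, List.range_succ_eq_map]
  simp only [List.map_cons, List.map_map, Nat.cast_zero, mul_zero, add_zero]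
  congr 1
  apply List.map_congr_left
  intro k _
  simp [Function.comp]
  ring

-- the inner loop is formatting over the range truncated at l
lemma pvInnerA_spec (lats lngs : List String) (l : Int) :
    ∀ (n : Nat) (p q : Int), (q - p).toNat ≤ n →
    pvInnerA lats lngs l p q
      = (PySem.List.pyRange p (min q l) 1).map
          (fun i => PySem.List.pyGetD lats i "" ++ "," ++ PySem.List.pyGetD lngs i "") := by
  intro n
  induction n with
  | zero =>
    intro p q hn
    rw [pvInnerA, if_neg (by omega),
        show PySem.List.pyRange p (min q l) 1 = [] from PySem.List.pyRange_one_eq_nil (by omega)]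
    rfl
  | succ n ih =>
    intro p q hn
    by_cases hpq : p < q
    · rw [pvInnerA, if_pos hpq]
      by_cases hpl : p < l
      · have hmin : p < min q l := lt_min hpq hpl
        rw [if_neg (by omega), PySem.List.pyRange_one_cons hmin]
        simp only [List.map_cons]
        rw [ih (p + 1) q (by omega)]
      · rw [if_pos (by omega),
          show PySem.List.pyRange p (min q l) 1 = [] from PySem.List.pyRange_one_eq_nil (by omega)]
        rfl
    · rw [pvInnerA, if_neg (by omega),
          show PySem.List.pyRange p (min q l) 1 = [] from PySem.List.pyRange_one_eq_nil (by omega)]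
      rfl

-- a chunk of B's flat formatted list is the formatting of the range truncated at l
lemma pvSlice_formatted (lats lngs : List String) {p s : Int} (hp : 0 ≤ p) (hs : 0 < s) :
    PySem.List.slice ((PySem.List.pyRange 0 (lats.length : Int) 1).map
        (fun i => PySem.List.pyGetD lats i "" ++ "," ++ PySem.List.pyGetD lngs i ""))
        (some p) (some (p + s))
      = (PySem.List.pyRange p (min (p + s) (lats.length : Int)) 1).map
          (fun i => PySem.List.pyGetD lats i "" ++ "," ++ PySem.List.pyGetD lngs i "") := by
  set l : Int := (lats.length : Int) with hl
  have hl0 : 0 ≤ l := by simp [hl]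
  set f : Int → String := fun i => PySem.List.pyGetD lats i "" ++ "," ++ PySem.List.pyGetD lngs i "" with hf
  rw [PySem.List.slice_toNat _ hp (by omega)]
  have hts : (p + s).toNat - p.toNat = s.toNat := by omega
  rw [hts]
  by_cases hpl : p ≤ l
  · rw [PySem.List.pyRange_one_append 0 p l hp hpl, List.map_append]
    have hlen : ((PySem.List.pyRange 0 p 1).map f).length = p.toNat := by
      simp [PySem.List.length_pyRange_one]
    rw [← hlen, List.drop_left]
    set m := min (p + s) l with hm_def
    have hpm : p ≤ m := by omega
    have hml : m ≤ l := by omega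
    rw [PySem.List.pyRange_one_append p m l hpm hml, List.map_append]
    by_cases hc : p + s ≤ l
    · have hlen2 : ((PySem.List.pyRange p m 1).map f).length = s.toNat := by
        simp [PySem.List.length_pyRange_one]; omega
      rw [← hlen2, List.take_left]
    · rw [show PySem.List.pyRange m l 1 = [] from PySem.List.pyRange_one_eq_nil (by omega)]
      simp only [List.map_nil, List.append_nil]
      apply List.take_of_length_le
      simp [PySem.List.length_pyRange_one]; omega
  · have h1 : List.drop p.toNat ((PySem.List.pyRange 0 l 1).map f) = [] := by
      apply List.drop_eq_nil_of_le
      simp [PySem.List.length_pyRange_one]; omega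
    rw [h1,
      show PySem.List.pyRange p (min (p + s) l) 1 = [] from PySem.List.pyRange_one_eq_nil (by omega)]
    simp

-- the outer loop with prev_r tracking equals the map over chunk starts
lemma pvOuterA_eq (lats lngs : List String) {s : Int} (hs : 0 < s) :
    ∀ (n : Nat) (p : Int), 0 ≤ p → ((lats.length : Int) - p).toNat ≤ n →
    pvOuterA lats lngs (lats.length : Int) p
        (PySem.List.pyRange (p + s) ((lats.length : Int) + s) s)
      = (PySem.List.pyRange p (lats.length : Int) s).map
          (fun i => PySem.Str.join "|" (PySem.List.slice
            ((PySem.List.pyRange 0 (lats.length : Int) 1).map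
              (fun j => PySem.List.pyGetD lats j "" ++ "," ++ PySem.List.pyGetD lngs j ""))
            (some i) (some (i + s)))) := by
  intro n
  induction n with
  | zero =>
    intro p hp hn
    rw [show PySem.List.pyRange (p + s) ((lats.length : Int) + s) s = [] from
          pvRange_pos_nil hs (by omega),
        show PySem.List.pyRange p (lats.length : Int) s = [] from pvRange_pos_nil hs (by omega)]
    rfl
  | succ n ih =>
    intro p hp hn
    by_cases hpl : p < (lats.length : Int)
    · rw [pvRange_pos_cons hs (show p + s < (lats.length : Int) + s by omega),
          pvRange_pos_cons hs hpl]
      simp only [pvOuterA, List.map_cons]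
      congr 1
      · rw [pvInnerA_spec lats lngs (lats.length : Int) s.toNat p (p + s) (by omega),
            pvSlice_formatted lats lngs hp hs]
      · exact ih (p + s) (by omega) (by omega)
    · rw [show PySem.List.pyRange (p + s) ((lats.length : Int) + s) s = [] from
            pvRange_pos_nil hs (by omega),
          show PySem.List.pyRange p (lats.length : Int) s = [] from pvRange_pos_nil hs (by omega)]
      rfl

-- ===== VERDICT (by name: the statement is the Claim_ definition above) =====
theorem create_formated_location_steps_spec : Claim_equal_create_formated_location_steps := by
  intro lats lngs r_step _ hpre
  unfold Spec_create_formated_location_steps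
  obtain ⟨hne, _⟩ := hpre
  unfold create_formated_location_steps create_formated_location_steps_alt
  have hl0 : (0 : Int) ≤ (lats.length : Int) := Int.natCast_nonneg _
  rcases lt_or_gt_of_ne hne with hneg | hpos
  · rw [pvRange_nonpos_nil hneg (by omega)]
    show ([] : List String)
      = (PySem.List.pyRange 0 (lats.length : Int) r_step).map _
    rw [pvRange_nonpos_nil hneg hl0]
    rfl
  · show pvOuterA lats lngs (lats.length : Int) 0
        (PySem.List.pyRange r_step ((lats.length : Int) + r_step) r_step)
      = (PySem.List.pyRange 0 (lats.length : Int) r_step).map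
          (fun i => PySem.Str.join "|" (PySem.List.slice
            ((PySem.List.pyRange 0 (lats.length : Int) 1).map
              (fun j => PySem.List.pyGetD lats j "" ++ "," ++ PySem.List.pyGetD lngs j ""))
            (some i) (some (i + r_step))))
    have := pvOuterA_eq lats lngs hpos lats.length 0 le_rfl (by omega)
    rw [zero_add] at this
    exact this
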